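-- pv_equiv track=rewrite | github.com/WhatIsProtocoll/Pilot-Prompt | transcription_utils.py | normalize_text_to_callsign
-- ===== SOURCE A (Python) =====
-- ICAO_TO_LETTER = {
--     "alfa": "A", "bravo": "B", "charlie": "C", "delta": "D", "echo": "E",
--     "foxtrot": "F", "golf": "G", "hotel": "H", "india": "I", "juliett": "J",
--     "kilo": "K", "lima": "L", "mike": "M", "november": "N", "oscar": "O",
--     "papa": "P", "quebec": "Q", "romeo": "R", "sierra": "S", "tango": "T",
--     "uniform": "U", "victor": "V", "whiskey": "W", "x-ray": "X",
--     "yankee": "Y", "zulu": "Z"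
-- }
--
-- REGISTRATION_PREFIXES = {"D","OE","HB", "G", "F", "I", "EC", "LX", "LN"}
--
-- def normalize_text_to_callsign(text):
--     words = text.lower().split()
--     letters = []
--
--     for word in words:
--         if word in ICAO_TO_LETTER:
--             letters.append(ICAO_TO_LETTER[word])
--         elif len(word) == 1:
--             letters.append(word.upper())
--         else:
--             break  # Stop at first unrelated word
--
--     raw_callsign = ''.join(letters)
--
--     # Match known registration prefix
--     for prefix in sorted(REGISTRATION_PREFIXES, key=len, reverse=True):
--         if raw_callsign.startswith(prefix):
--             return f"{prefix}-{raw_callsign[len(prefix):]}"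
--
--     return raw_callsign  # fallback without dash
-- ===== SOURCE B (Python) =====
-- ICAO_TO_LETTER = {
--     "alfa": "A", "bravo": "B", "charlie": "C", "delta": "D", "echo": "E",
--     "foxtrot": "F", "golf": "G", "hotel": "H", "india": "I", "juliett": "J",
--     "kilo": "K", "lima": "L", "mike": "M", "november": "N", "oscar": "O",
--     "papa": "P", "quebec": "Q", "romeo": "R", "sierra": "S", "tango": "T",
--     "uniform": "U", "victor": "V", "whiskey": "W", "x-ray": "X",
--     "yankee": "Y", "zulu": "Z"
-- }
--
-- ONE_LETTER = {"D", "G", "F", "I"}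
-- TWO_LETTER = {"OE", "HB", "EC", "LX", "LN"}
--
--
-- def _letters(words):
--     """Recursively convert the leading convertible run of words to letters."""
--     if not words:
--         return []
--     w = words[0]
--     if w in ICAO_TO_LETTER:
--         return [ICAO_TO_LETTER[w]] + _letters(words[1:])
--     if len(w) == 1:
--         return [w.upper()] + _letters(words[1:])
--     return []
--
--
-- def normalize_text_to_callsign(text):
--     ls = _letters(text.lower().split())
--     # Decide the dash placement from the first one or two letters directly:
--     # no raw string is scanned against a prefix list.
--     if not ls:
--         return ''
--     if len(ls) == 1:
--         a = ls[0]
--         return a + '-' if a in ONE_LETTER else a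
--     a, b, rest = ls[0], ls[1], ''.join(ls[2:])
--     if a + b in TWO_LETTER:
--         return a + b + '-' + rest
--     if a in ONE_LETTER:
--         return a + '-' + b + rest
--     return a + b + rest
-- ===== Notes on version B (the rewrite author's own statement) =====
-- stated objective: alternative
-- what changed: B never builds a raw callsign string to scan against a prefix list: a recursive word-to-letter conversion replaces A's append/break loop, and the dash is placed by direct case analysis on the first one or two letters (empty / single / two-plus cases) instead of A's startswith loop over the length-sorted prefix set.
import Mathlib
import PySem

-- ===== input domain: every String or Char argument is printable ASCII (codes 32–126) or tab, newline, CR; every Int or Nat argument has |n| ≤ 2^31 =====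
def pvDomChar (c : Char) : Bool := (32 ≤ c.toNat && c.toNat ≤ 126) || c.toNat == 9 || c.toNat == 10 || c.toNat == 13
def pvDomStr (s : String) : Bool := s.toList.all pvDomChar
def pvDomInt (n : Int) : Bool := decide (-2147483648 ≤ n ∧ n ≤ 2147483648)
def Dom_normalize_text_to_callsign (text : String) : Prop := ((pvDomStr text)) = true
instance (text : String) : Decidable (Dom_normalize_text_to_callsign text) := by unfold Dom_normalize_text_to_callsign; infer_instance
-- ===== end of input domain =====

-- B drops the raw-string + prefix-scan phase entirely: a recursive word→letter conversion,
-- then the dash placement decided by case analysis on the first one or two letters; same cost.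

-- ===== PORT A =====
-- shared module constant ICAO_TO_LETTER
def icaoDict : PySem.Dict String String := PySem.Dict.ofList [
  ("alfa","A"), ("bravo","B"), ("charlie","C"), ("delta","D"), ("echo","E"),
  ("foxtrot","F"), ("golf","G"), ("hotel","H"), ("india","I"), ("juliett","J"),
  ("kilo","K"), ("lima","L"), ("mike","M"), ("november","N"), ("oscar","O"),
  ("papa","P"), ("quebec","Q"), ("romeo","R"), ("sierra","S"), ("tango","T"),
  ("uniform","U"), ("victor","V"), ("whiskey","W"), ("x-ray","X"),
  ("yankee","Y"), ("zulu","Z")]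

def regPrefixes : PySem.Set String := PySem.Set.ofList ["D","OE","HB","G","F","I","EC","LX","LN"]

-- the letters-collecting loop with its break
def lettersLoopA : List String → List (List Char)
  | [] => []
  | w :: rest =>
    match PySem.Dict.get? icaoDict w with
    | some l => l.toList :: lettersLoopA rest
    | none =>
      if PySem.Str.len w == 1 then (PySem.Str.upper w).toList :: lettersLoopA rest
      else []

-- the prefix loop: first startswith match wins
def prefixLoopA : List String → List Char → String
  | [], raw => String.ofList raw
  | p :: rest, raw =>
    if PySem.Chars.startswith raw p.toList then
      String.ofList (p.toList ++ '-' :: PySem.Chars.slice raw (some (p.toList.length : Int)) none)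
    else prefixLoopA rest raw

-- sorted(REGISTRATION_PREFIXES, key=len, reverse=True): set iteration order is unspecified in
-- Python, but the loop's result is independent of the order among equal-length prefixes, so the
-- port sorts the literal list (exact for the returned value).
def normalize_text_to_callsign (text : String) : String :=
  let words := PySem.Str.split₀ (PySem.Str.lower text)
  let raw := PySem.Chars.join [] (lettersLoopA words)
  prefixLoopA (PySem.List.sorted regPrefixes (fun p => PySem.Str.len p) true) raw

-- ===== PORT B =====
def oneLetterB : PySem.Set (List Char) := PySem.Set.ofList [['D'],['G'],['F'],['I']]
def twoLetterB : PySem.Set (List Char) := PySem.Set.ofList [['O','E'],['H','B'],['E','C'],['L','X'],['L','N']]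

-- Source B's recursive _letters
def lettersB : List String → List (List Char)
  | [] => []
  | w :: rest =>
    match PySem.Dict.get? icaoDict w with
    | some l => l.toList :: lettersB rest
    | none =>
      if PySem.Str.len w == 1 then (PySem.Str.upper w).toList :: lettersB rest
      else []

-- Source B's case analysis on the letter list (empty / single / two-or-more letters)
def dashB : List (List Char) → String
  | [] => ""
  | [a] => if oneLetterB.contains a then String.ofList (a ++ ['-']) else String.ofList a
  | a :: b :: rest =>
    let r := PySem.Chars.join [] rest
    if twoLetterB.contains (a ++ b) then String.ofList (a ++ b ++ '-' :: r)
    else if oneLetterB.contains a then String.ofList (a ++ '-' :: (b ++ r))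
    else String.ofList (a ++ b ++ r)

def normalize_text_to_callsign_alt (text : String) : String :=
  dashB (lettersB (PySem.Str.split₀ (PySem.Str.lower text)))

-- ===== PRECONDITION & SPEC =====
def Spec_normalize_text_to_callsign (text : String) (out : String) : Prop := out = normalize_text_to_callsign_alt text
instance (text : String) (out : String) : Decidable (Spec_normalize_text_to_callsign text out) := by unfold Spec_normalize_text_to_callsign; infer_instance

-- ===== CLAIM (what is proved, stated in full; the proofs are below) =====
def Claim_equal_normalize_text_to_callsign : Prop := ∀ (text : String), Dom_normalize_text_to_callsign text → Spec_normalize_text_to_callsign text (normalize_text_to_callsign text)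

-- ===== LEMMAS AND PROOFS =====

-- A's loop and B's recursion build the same letter list
theorem lettersB_eq (ws : List String) : lettersB ws = lettersLoopA ws := by
  induction ws with
  | nil => rfl
  | cons w rest ih =>
    simp only [lettersB, lettersLoopA, ih]

-- every collected letter is a single character
theorem icao_val_len : ∀ {w v : String}, PySem.Dict.get? icaoDict w = some v → v.toList.length = 1 := by
  intro w v h
  have hm := PySem.Dict.mem_items_of_get?_eq_some _ h
  fin_cases hm <;> decide

theorem letters_len_one (ws : List String) : ∀ l ∈ lettersLoopA ws, l.length = 1 := by
  induction ws with
  | nil => intro l hl; simp [lettersLoopA] at hl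
  | cons w rest ih =>
    intro l hl
    simp only [lettersLoopA] at hl
    cases hg : PySem.Dict.get? icaoDict w with
    | some v =>
      rw [hg] at hl
      rcases List.mem_cons.mp hl with h | h
      · exact h ▸ icao_val_len hg
      · exact ih l h
    | none =>
      rw [hg] at hl
      by_cases hw : PySem.Str.len w == 1
      · rw [if_pos hw] at hl
        rcases List.mem_cons.mp hl with h | h
        · subst h
          have : w.toList.length = 1 := by
            simpa [PySem.Str.len] using (beq_iff_eq.mp hw)
          simp [PySem.Str.toList_upper, PySem.Chars.upper, this]
        · exact ih l h
      · rw [if_neg hw] at hl; simp at hl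

-- a list of singleton letters is the singleton-map of its join
theorem singletons_eq (ls : List (List Char)) (h : ∀ l ∈ ls, l.length = 1) :
    ls = (PySem.Chars.join [] ls).map (fun c => [c]) := by
  induction ls with
  | nil => simp [PySem.Chars.join_nil]
  | cons l t ih =>
    obtain ⟨c, rfl⟩ := List.length_eq_one_iff.mp (h l (List.mem_cons_self ..))
    have ht := ih (fun x hx => h x (List.mem_cons_of_mem _ hx))
    cases t with
    | nil => simp [PySem.Chars.join_singleton]
    | cons x t' =>
      rw [PySem.Chars.join_cons_cons]
      simpa using ht

-- A's prefix scan equals B's first-two-letters case analysis, on singleton letter lists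
set_option maxHeartbeats 1600000 in
theorem phase2_eq (cs : List Char) :
    prefixLoopA (PySem.List.sorted regPrefixes (fun p => PySem.Str.len p) true) cs
      = dashB (cs.map (fun c => [c])) := by
  rw [show PySem.List.sorted regPrefixes (fun p => PySem.Str.len p) true
        = ["OE","HB","EC","LX","LN","D","G","F","I"] from by decide]
  have hsw : ∀ p : List Char, (PySem.Chars.startswith cs p = true) ↔ cs.take p.length = p := by
    intro p; rw [PySem.Chars.startswith_iff, List.prefix_iff_eq_take, eq_comm]
  have e1 : "OE".toList = ['O','E'] := by decide
  have e2 : "HB".toList = ['H','B'] := by decide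
  have e3 : "EC".toList = ['E','C'] := by decide
  have e4 : "LX".toList = ['L','X'] := by decide
  have e5 : "LN".toList = ['L','N'] := by decide
  have f1 : "D".toList = ['D'] := by decide
  have f2 : "G".toList = ['G'] := by decide
  have f3 : "F".toList = ['F'] := by decide
  have f4 : "I".toList = ['I'] := by decide
  have sl2 : ∀ (x y : Char) (r : List Char), PySem.List.slice (x::y::r) (some (2:Int)) none = r := by
    intro x y r
    rw [show ((2:Int)) = ((2:Nat):Int) from rfl, PySem.List.slice_from_natCast]; rfl
  have sl1 : ∀ (x : Char) (r : List Char), PySem.List.slice (x::r) (some (1:Int)) none = r := by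
    intro x r
    rw [show ((1:Int)) = ((1:Nat):Int) from rfl, PySem.List.slice_from_natCast]; rfl
  match cs with
  | [] => decide
  | [a] =>
    simp only [prefixLoopA, List.map, dashB, e1, e2, e3, e4, e5, f1, f2, f3, f4, hsw,
      oneLetterB, PySem.Set.ofList, List.length_cons, List.length_nil, List.take_succ_cons,
      List.take_nil]
    split_ifs <;> simp_all [sl1]
  | a :: b :: t =>
    have hj : PySem.Chars.join [] (t.map (fun c => [c])) = t := PySem.Chars.join_nil_singletons _
    simp only [prefixLoopA, List.map, dashB, e1, e2, e3, e4, e5, f1, f2, f3, f4, hsw,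
      hj, oneLetterB, twoLetterB, PySem.Set.ofList, List.length_cons, List.length_nil,
      List.take_succ_cons]
    split_ifs <;> simp_all [sl2, sl1] <;>
      (exfalso; rcases ‹_ ∨ _ ∨ _ ∨ _ ∨ _› with h|h|h|h|h <;> obtain ⟨h1, h2⟩ := h <;> simp_all)

-- ===== VERDICT (by name: the statement is the Claim_ definition above) =====
theorem normalize_text_to_callsign_spec : Claim_equal_normalize_text_to_callsign := by
  intro text _
  show normalize_text_to_callsign text = normalize_text_to_callsign_alt text
  simp only [normalize_text_to_callsign, normalize_text_to_callsign_alt, lettersB_eq]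
  rw [phase2_eq, ← singletons_eq _ (letters_len_one _)]
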